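-- pv_equiv track=rewrite | github.com/Pl4tt/Algorithms | python/backtracking/n_queens.py | possible_candidates
-- ===== SOURCE A (Python) =====
-- def possible_candidates(state, n):
--     if not state:
--         return range(n)
--
--     position = len(state)
--     candidates = set(range(n))
--
--     for row, col in enumerate(state):
--         # check row and col
--         candidates.discard(col)
--
--         # check diagonal
--         diag = position - row
--
--         candidates.discard(col - diag)
--         candidates.discard(col + diag)
--
--     return candidates
-- ===== SOURCE B (Python) =====
-- def possible_candidates(state, n):
--     if not state:
--         return range(n)
--
--     position = len(state)
--     result = set()
--     for col in range(n):
--         if all(col != qcol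
--                and col != qcol - (position - row)
--                and col != qcol + (position - row)
--                for row, qcol in enumerate(state)):
--             result.add(col)
--     return result
-- ===== Notes on version B (the rewrite author's own statement) =====
-- stated objective: idiomatic
-- what changed: A starts from the full set of columns and eliminates attacked ones by discarding per placed queen; B flips the scan: it iterates candidate columns and accepts a column only after checking it against every placed queen (with early break), building the result set incrementally.
import Mathlib
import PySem

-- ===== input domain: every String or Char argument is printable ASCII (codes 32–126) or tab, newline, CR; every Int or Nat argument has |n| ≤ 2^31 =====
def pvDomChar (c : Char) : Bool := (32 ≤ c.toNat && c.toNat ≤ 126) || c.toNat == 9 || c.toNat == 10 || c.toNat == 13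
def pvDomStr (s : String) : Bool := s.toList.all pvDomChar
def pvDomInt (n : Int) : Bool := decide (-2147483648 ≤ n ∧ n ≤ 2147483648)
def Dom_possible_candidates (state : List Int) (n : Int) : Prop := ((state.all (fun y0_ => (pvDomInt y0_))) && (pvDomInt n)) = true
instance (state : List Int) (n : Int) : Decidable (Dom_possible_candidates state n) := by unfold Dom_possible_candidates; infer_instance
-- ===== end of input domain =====

-- B replaces A's eliminate-from-the-full-set scan (discard the three attacked squares per queen)
-- by an accept-each-column scan (keep a column iff no placed queen attacks it).
-- A returns a Python set (hash iteration order not modelled); the equality proved here holds for the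
-- canonical increasing-order element list both ports produce.

-- ===== PORT A =====
def possible_candidates (state : List Int) (n : Int) : List Int :=
  if state = [] then PySem.List.pyRange 0 n 1
  else
    let position : Int := (state.length : Int)
    let candidates : PySem.Set Int := PySem.Set.ofList (PySem.List.pyRange 0 n 1)
    (PySem.List.enumerate state 0).foldl (fun c rc =>
      let c1 := PySem.Set.discard c rc.2
      let diag := position - rc.1
      let c2 := PySem.Set.discard c1 (rc.2 - diag)
      PySem.Set.discard c2 (rc.2 + diag)) candidates

-- ===== PORT B =====
def possible_candidates_alt (state : List Int) (n : Int) : List Int :=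
  if state = [] then PySem.List.pyRange 0 n 1
  else
    let position : Int := (state.length : Int)
    (PySem.List.pyRange 0 n 1).foldl (fun res col =>
      if (PySem.List.enumerate state 0).all (fun rc =>
            decide (col ≠ rc.2) && decide (col ≠ rc.2 - (position - rc.1))
              && decide (col ≠ rc.2 + (position - rc.1)))
      then PySem.Set.add res col else res) PySem.Set.empty

-- ===== PRECONDITION & SPEC =====
def Spec_possible_candidates (state : List Int) (n : Int) (out : List Int) : Prop := out = possible_candidates_alt state n
instance (state : List Int) (n : Int) (out : List Int) : Decidable (Spec_possible_candidates state n out) := by unfold Spec_possible_candidates; infer_instance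

-- ===== CLAIM (what is proved, stated in full; the proofs are below) =====
def Claim_equal_possible_candidates : Prop := ∀ (state : List Int) (n : Int), Dom_possible_candidates state n → Spec_possible_candidates state n (possible_candidates state n)

-- ===== LEMMAS AND PROOFS =====

-- A's loop of discards is a filter by "no queen in l attacks x".
theorem foldA_eq_filter (pos : Int) (l : List (Int × Int)) (init : List Int) :
    l.foldl (fun c rc =>
      let c1 := PySem.Set.discard c rc.2
      let diag := pos - rc.1
      let c2 := PySem.Set.discard c1 (rc.2 - diag)
      PySem.Set.discard c2 (rc.2 + diag)) init
    = init.filter (fun x => l.all (fun rc =>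
        !(x == rc.2) && !(x == rc.2 - (pos - rc.1)) && !(x == rc.2 + (pos - rc.1)))) := by
  induction l generalizing init with
  | nil => simp
  | cons rc l ih =>
    rw [List.foldl_cons, ih]
    simp only [PySem.Set.discard, List.filter_filter, List.all_cons]
    apply List.filter_congr
    intro x _
    simp only [Bool.and_comm, Bool.and_assoc, Bool.and_left_comm]

-- B's loop of conditional adds over a nodup list disjoint from the accumulator is a filter.
theorem foldB_eq_filter (p : Int → Bool) (xs acc : List Int)
    (hnd : xs.Nodup) (hdis : ∀ x ∈ xs, x ∉ acc) :
    xs.foldl (fun res col => if p col then PySem.Set.add res col else res) acc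
    = acc ++ xs.filter p := by
  induction xs generalizing acc with
  | nil => simp
  | cons x xs ih =>
    simp only [List.nodup_cons] at hnd
    have hx : x ∉ acc := hdis x (List.mem_cons_self)
    simp only [List.foldl_cons, List.filter_cons]
    by_cases hp : p x = true
    · rw [hp, if_pos rfl]
      have : PySem.Set.add acc x = acc ++ [x] := by
        simp [PySem.Set.add, PySem.Set.contains, hx]
      rw [this, ih _ hnd.2 (by
        intro y hy
        simp only [List.mem_append, List.mem_singleton]
        rintro (h | rfl)
        · exact hdis y (List.mem_cons_of_mem _ hy) h
        · exact hnd.1 hy)]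
      simp
    · rw [if_neg (by simp [hp]), if_neg hp]
      exact ih _ hnd.2 (fun y hy => hdis y (List.mem_cons_of_mem _ hy))

-- ===== VERDICT =====
theorem possible_candidates_spec : Claim_equal_possible_candidates := by
  intro state n _
  unfold Spec_possible_candidates possible_candidates possible_candidates_alt
  by_cases h : state = []
  · simp [h]
  · simp only [if_neg h]
    rw [foldA_eq_filter, foldB_eq_filter _ _ _ (PySem.List.nodup_pyRange_one 0 n) (by simp)]
    rw [PySem.Set.ofList_eq_self_of_nodup _ (PySem.List.nodup_pyRange_one 0 n)]
    simp only [PySem.Set.empty, List.nil_append]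
    apply List.filter_congr
    intro x _
    congr 1
    funext rc
    simp only [ne_eq, decide_not, beq_eq_decide]
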